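-- pv_equiv track=rewrite | github.com/u-yuta/orgjournal-mcp | src/orgjournal_mcp/converter.py | filter_entries_by_tags
-- ===== SOURCE A (Python) =====
-- from typing import Optional, List, Dict, Any
--
-- def filter_entries_by_tags(
--     entries: List[Dict[str, Any]],
--     include_tags: Optional[List[str]] = None,
--     exclude_tags: Optional[List[str]] = None
-- ) -> List[Dict[str, Any]]:
--     """エントリーをタグでフィルタリング
--
--     Args:
--         entries: フィルタリング対象のエントリーリスト
--         include_tags: 含めるタグのリスト（Noneの場合は全て含める）
--         exclude_tags: 除外するタグのリスト（Noneの場合は除外しない）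
--
--     Returns:
--         フィルタリングされたエントリーのリスト
--     """
--     if not entries:
--         return entries
--
--     results = []
--
--     for entry in entries:
--         entry_tags = entry.get('tags', [])
--
--         # exclude_tags のチェック（優先）
--         if exclude_tags:
--             # 除外タグが1つでも含まれている場合はスキップ
--             if any(tag in exclude_tags for tag in entry_tags):
--                 continue
--
--         # include_tags のチェック
--         if include_tags is not None:
--             # 含めるタグが1つでも含まれている場合のみ追加
--             if any(tag in include_tags for tag in entry_tags):
--                 results.append(entry)
--         else:
--             # include_tags が指定されていない場合は、除外されなかったエントリーを全て追加
--             results.append(entry)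
--
--     return results
-- ===== SOURCE B (Python) =====
-- def filter_entries_by_tags(entries, include_tags=None, exclude_tags=None):
--     if not entries:
--         return entries
--     # Build an inverted index once: tag -> list of entry positions carrying it.
--     index = {}
--     for i, entry in enumerate(entries):
--         for tag in entry.get('tags', []):
--             index.setdefault(tag, []).append(i)
--     # Mark positions instead of testing each entry against the tag lists:
--     # the query tags drive the work via the index postings.
--     keep = [True] * len(entries)
--     for tag in exclude_tags or ():
--         for i in index.get(tag, ()):
--             keep[i] = False
--     if include_tags is not None:
--         hit = [False] * len(entries)
--         for tag in include_tags:
--             for i in index.get(tag, ()):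
--                 hit[i] = True
--         keep = [a and b for a, b in zip(keep, hit)]
--     return [entry for entry, k in zip(entries, keep) if k]
-- ===== Notes on version B (the rewrite author's own statement) =====
-- stated objective: alternative
-- what changed: Replaces A's per-entry predicate loop (each entry's tags scanned against both tag lists) by an inverted index (tag -> entry positions) built once plus query-driven marking of a boolean mask, then one zip-filter pass in original order.
import Mathlib
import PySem

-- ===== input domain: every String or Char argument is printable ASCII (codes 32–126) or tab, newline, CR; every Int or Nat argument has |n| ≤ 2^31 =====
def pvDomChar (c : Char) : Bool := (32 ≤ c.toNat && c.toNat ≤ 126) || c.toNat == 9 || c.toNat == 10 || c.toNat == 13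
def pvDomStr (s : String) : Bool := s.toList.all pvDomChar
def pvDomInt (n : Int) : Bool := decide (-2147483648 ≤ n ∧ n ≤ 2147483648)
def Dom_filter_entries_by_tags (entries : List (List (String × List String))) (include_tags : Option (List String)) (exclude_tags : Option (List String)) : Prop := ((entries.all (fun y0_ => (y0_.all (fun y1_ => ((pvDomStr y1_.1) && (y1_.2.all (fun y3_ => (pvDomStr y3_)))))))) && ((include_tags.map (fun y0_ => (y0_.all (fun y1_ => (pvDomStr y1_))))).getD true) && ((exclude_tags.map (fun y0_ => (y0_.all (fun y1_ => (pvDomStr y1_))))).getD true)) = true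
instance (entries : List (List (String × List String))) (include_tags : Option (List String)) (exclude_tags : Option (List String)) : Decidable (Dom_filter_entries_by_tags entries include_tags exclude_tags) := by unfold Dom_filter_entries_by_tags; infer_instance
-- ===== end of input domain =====

-- B replaces A's per-entry predicate loop by an inverted index (tag -> entry
-- positions) built once plus query-driven marking of a boolean mask, then one
-- zip-filter pass in the original order: a different data structure/traversal.

-- entry.get('tags', []): first matching key in the association list, default []
def pvGetTags (entry : List (String × List String)) : List String :=
  match entry.find? (fun p => p.1 == "tags") with
  | some p => p.2
  | none => []

-- ===== PORT A =====
def filter_entries_by_tags (entries : List (List (String × List String))) (include_tags : Option (List String)) (exclude_tags : Option (List String)) : List (List (String × List String)) :=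
  if entries.isEmpty then entries
  else
    entries.foldl (fun results entry =>
      let entry_tags := pvGetTags entry
      -- `if exclude_tags:` is truthy only for `some ex` with ex nonempty
      if (match exclude_tags with
          | some ex => !ex.isEmpty && entry_tags.any (fun tag => ex.contains tag)
          | none => false) then
        results          -- continue
      else
        match include_tags with
        | some il =>
          if entry_tags.any (fun tag => il.contains tag) then results ++ [entry] else results
        | none => results ++ [entry]) []

-- ===== PORT B =====
-- `exclude_tags or ()`: the list when truthy (iterating an empty list and () is the same), else nothing to iterate
def pvOrEmpty (o : Option (List String)) : List String :=
  match o with | none => [] | some l => l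

-- the inverted index: for i, entry in enumerate(entries): for tag in tags: index.setdefault(tag, []).append(i)
def pvIndex (entries : List (List (String × List String))) : PySem.Dict String (List Int) :=
  (PySem.List.enumerate entries).foldl
    (fun d p => (pvGetTags p.2).foldl (fun d tag => d.modify tag [] (fun v => v ++ [p.1])) d)
    PySem.Dict.empty

def filter_entries_by_tags_alt (entries : List (List (String × List String))) (include_tags : Option (List String)) (exclude_tags : Option (List String)) : List (List (String × List String)) :=
  if entries.isEmpty then entries
  else
    let index := pvIndex entries
    let keep0 := List.replicate entries.length true
    let keep1 := (pvOrEmpty exclude_tags).foldl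
      (fun k tag => (index.getD tag []).foldl (fun k i => PySem.List.pySetD k i false) k) keep0
    let keepF := match include_tags with
      | some il =>
        let hit := il.foldl
          (fun h tag => (index.getD tag []).foldl (fun h i => PySem.List.pySetD h i true) h)
          (List.replicate entries.length false)
        (keep1.zip hit).map (fun p => p.1 && p.2)
      | none => keep1
    ((entries.zip keepF).filter (fun p => p.2)).map (fun p => p.1)

-- ===== PRECONDITION & SPEC =====
def Spec_filter_entries_by_tags (entries : List (List (String × List String))) (include_tags : Option (List String)) (exclude_tags : Option (List String)) (out : List (List (String × List String))) : Prop := out = filter_entries_by_tags_alt entries include_tags exclude_tags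
instance (entries : List (List (String × List String))) (include_tags : Option (List String)) (exclude_tags : Option (List String)) (out : List (List (String × List String))) : Decidable (Spec_filter_entries_by_tags entries include_tags exclude_tags out) := by unfold Spec_filter_entries_by_tags; infer_instance

-- ===== CLAIM (what is proved, stated in full; the proofs are below) =====
def Claim_equal_filter_entries_by_tags : Prop := ∀ (entries : List (List (String × List String))) (include_tags : Option (List String)) (exclude_tags : Option (List String)), Dom_filter_entries_by_tags entries include_tags exclude_tags → Spec_filter_entries_by_tags entries include_tags exclude_tags (filter_entries_by_tags entries include_tags exclude_tags)

-- ===== LEMMAS AND PROOFS =====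

-- the index as a flat list of (tag, position) postings
def pvPairs (entries : List (List (String × List String))) : List (String × Int) :=
  (PySem.List.enumerate entries).flatMap (fun p => (pvGetTags p.2).map (fun tg => (tg, p.1)))

-- a loop with an inner loop over g x is the loop over the flattened list
theorem pv_foldl_nested {α β γ : Type} (g : α → List β) (f : γ → β → γ) :
    ∀ (l : List α) (init : γ),
      l.foldl (fun a x => (g x).foldl f a) init = (l.flatMap g).foldl f init := by
  intro l
  induction l with
  | nil => simp
  | cons x xs ih => intro init; simp [List.foldl_append, ih]

-- the inner tag loop is the pair loop over the tags paired with the fixed position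
theorem pv_inner (p1 : Int) (tags : List String) (d : PySem.Dict String (List Int)) :
    tags.foldl (fun d tag => d.modify tag [] (fun v => v ++ [p1])) d
      = (tags.map (fun tg => (tg, p1))).foldl (fun d q => d.modify q.1 [] (fun v => v ++ [q.2])) d := by
  induction tags generalizing d with
  | nil => rfl
  | cons a l ih => simp [ih]

theorem pvIndex_getD (entries : List (List (String × List String))) (t : String) :
    (pvIndex entries).getD t []
      = ((pvPairs entries).filter (fun q => q.1 == t)).map (fun q => q.2) := by
  have h : ∀ (l : List (Int × List (String × List String))) (d : PySem.Dict String (List Int)),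
      (l.foldl (fun d p => (pvGetTags p.2).foldl (fun d tag => d.modify tag [] (fun v => v ++ [p.1])) d) d).getD t []
        = d.getD t [] ++ ((l.flatMap (fun p => (pvGetTags p.2).map (fun tg => (tg, p.1)))).filter (fun q => q.1 == t)).map (fun q => q.2) := by
    intro l
    induction l with
    | nil => simp
    | cons p l ih =>
      intro d
      rw [List.foldl_cons, ih, List.flatMap_cons, List.filter_append, List.map_append,
        pv_inner, PySem.Dict.getD_foldl_modify_append]
      simp [List.filter_map, List.map_map, Function.comp_def]
  simpa [pvIndex, pvPairs] using h (PySem.List.enumerate entries) PySem.Dict.empty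

theorem pv_mem_enumerate {α : Type} :
    ∀ (xs : List α) (s : Int) (q : Int × α),
      q ∈ PySem.List.enumerate xs s ↔ ∃ k : Nat, xs[k]? = some q.2 ∧ q.1 = s + k := by
  intro xs
  induction xs with
  | nil => intro s q; simp [PySem.List.enumerate_nil]
  | cons x xs ih =>
    intro s q
    rw [PySem.List.enumerate_cons]
    simp only [List.mem_cons, ih]
    constructor
    · rintro (rfl | ⟨k, hk, hq⟩)
      · exact ⟨0, by simp, by simp⟩
      · exact ⟨k + 1, by simpa using hk, by push_cast at hq ⊢; omega⟩
    · rintro ⟨k, hk, hq⟩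
      cases k with
      | zero =>
        left
        simp only [List.getElem?_cons_zero, Option.some.injEq] at hk
        obtain ⟨q1, q2⟩ := q
        simp only at hk hq ⊢
        simp [hk, hq]
      | succ k =>
        right
        exact ⟨k, by simpa using hk, by push_cast at hq ⊢; omega⟩

theorem pv_mem_idx (entries : List (List (String × List String))) (t : String)
    (j : Nat) (e : List (String × List String)) (hje : entries[j]? = some e) :
    ((j : Int) ∈ (pvIndex entries).getD t []) ↔ t ∈ pvGetTags e := by
  rw [pvIndex_getD]
  simp only [pvPairs, List.mem_map, List.mem_filter, List.mem_flatMap, pv_mem_enumerate,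
    beq_iff_eq, List.mem_map]
  constructor
  · rintro ⟨q, ⟨⟨p, ⟨k, hk, hp1⟩, tg, htg, rfl⟩, ht⟩, hj⟩
    simp only at ht hj
    subst ht
    have hkj : k = j := by omega
    subst hkj
    have hpe : p.2 = e := by
      rw [hje] at hk
      exact (Option.some_inj.mp hk).symm
    exact hpe ▸ htg
  · intro ht
    exact ⟨(t, (j : Int)), ⟨⟨((j : Int), e), ⟨j, by simpa using hje, by simp⟩, t, ht, rfl⟩, rfl⟩, rfl⟩

theorem pv_idx_nonneg (entries : List (List (String × List String))) (t : String) :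
    ∀ i ∈ (pvIndex entries).getD t [], 0 ≤ i := by
  intro i hi
  rw [pvIndex_getD] at hi
  simp only [pvPairs, List.mem_map, List.mem_filter, List.mem_flatMap, pv_mem_enumerate,
    List.mem_map] at hi
  obtain ⟨q, ⟨⟨p, ⟨k, _, hp1⟩, tg, _, rfl⟩, _⟩, hj⟩ := hi
  simp only at hj
  omega

theorem pv_foldl_set_getElem? (v : Bool) :
    ∀ (js : List Int) (k : List Bool) (j : Nat), (∀ i ∈ js, 0 ≤ i) →
      (js.foldl (fun k i => PySem.List.pySetD k i v) k)[j]? =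
        if (j : Int) ∈ js ∧ j < k.length then some v else k[j]? := by
  intro js
  induction js with
  | nil => intro k j _; simp
  | cons i js ih =>
    intro k j h
    have h0 : 0 ≤ i := h i (List.mem_cons_self)
    rw [List.foldl_cons, PySem.List.pySetD_of_nonneg _ _ h0,
      ih _ j (fun x hx => h x (List.mem_cons_of_mem _ hx))]
    simp only [List.length_set, List.getElem?_set, List.mem_cons]
    by_cases hj : j < k.length
    · by_cases hmem : (j : Int) ∈ js
      · simp [hj, hmem]
      · by_cases hij : (j : Int) = i
        · have hn : i.toNat = j := by omega
          simp [hj, hij, hn]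
        · have hn : i.toNat ≠ j := by omega
          simp [hj, hmem, hij, hn]
    · have hnone : k[j]? = none := List.getElem?_eq_none (by omega)
      simp only [hj, and_false, if_false, hnone]
      split_ifs with h1 h2 <;> (simp_all; try omega)

theorem pv_mark_eq_map (entries : List (List (String × List String)))
    (ts : List String) (v init : Bool) :
    ts.foldl (fun k tag => ((pvIndex entries).getD tag []).foldl
        (fun k i => PySem.List.pySetD k i v) k) (List.replicate entries.length init)
      = entries.map (fun e => if ts.any (fun t => (pvGetTags e).contains t) then v else init) := by
  rw [pv_foldl_nested]
  have hnn : ∀ i ∈ ts.flatMap (fun t => (pvIndex entries).getD t []), 0 ≤ i := by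
    intro i hi
    simp only [List.mem_flatMap] at hi
    obtain ⟨t, _, hit⟩ := hi
    exact pv_idx_nonneg entries t i hit
  apply List.ext_getElem?
  intro j
  rw [pv_foldl_set_getElem? v _ _ j hnn]
  by_cases hj : j < entries.length
  · have he : entries[j]? = some entries[j] := List.getElem?_eq_getElem hj
    have hiff : ((j : Int) ∈ ts.flatMap (fun t => (pvIndex entries).getD t []))
        ↔ ts.any (fun t => (pvGetTags entries[j]).contains t) = true := by
      simp only [List.mem_flatMap, List.any_eq_true]
      refine exists_congr fun t => and_congr_right fun _ => ?_
      rw [pv_mem_idx entries t j entries[j] he]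
      simp
    by_cases hany : ts.any (fun t => (pvGetTags entries[j]).contains t) = true
    · rw [if_pos ⟨hiff.mpr hany, by simpa using hj⟩, List.getElem?_map, he, Option.map_some,
        if_pos hany]
    · rw [if_neg (fun hc => hany (hiff.mp hc.1)), List.getElem?_map, he, Option.map_some,
        List.getElem?_replicate, if_pos hj, if_neg hany]
  · rw [if_neg (fun hc => hj (by simpa using hc.2))]
    have h1 : j ≥ (List.replicate entries.length init).length := by simpa using Nat.le_of_not_lt hj
    have h2 : j ≥ (entries.map (fun e => if ts.any (fun t => (pvGetTags e).contains t) then v else init)).length := by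
      simpa using Nat.le_of_not_lt hj
    rw [List.getElem?_eq_none h1, List.getElem?_eq_none h2]

theorem pv_zip_filter {α : Type} (l : List α) (p : α → Bool) :
    ((l.zip (l.map p)).filter (fun q => q.2)).map (fun q => q.1) = l.filter p := by
  induction l with
  | nil => rfl
  | cons x xs ih => by_cases h : p x <;> simp [h, ih]

theorem pv_if_not (c : Bool) : (if c = true then false else true) = !c := by cases c <;> rfl

theorem pv_if_id (c : Bool) : (if c = true then true else false) = c := by cases c <;> rfl

theorem pv_alt_eq_filter (entries : List (List (String × List String)))
    (include_tags exclude_tags : Option (List String)) (h : entries.isEmpty = false) :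
    filter_entries_by_tags_alt entries include_tags exclude_tags
      = entries.filter (fun e =>
          (!(pvOrEmpty exclude_tags).any (fun t => (pvGetTags e).contains t)) &&
          (match include_tags with
           | none => true
           | some il => il.any (fun t => (pvGetTags e).contains t))) := by
  cases include_tags with
  | none =>
    simp only [filter_entries_by_tags_alt, h, Bool.false_eq_true, if_false]
    rw [pv_mark_eq_map, pv_zip_filter]
    apply List.filter_congr
    intro e _
    simp only [pv_if_not, Bool.and_true]
  | some il =>
    simp only [filter_entries_by_tags_alt, h, Bool.false_eq_true, if_false]
    rw [pv_mark_eq_map, pv_mark_eq_map, List.zip_map', List.map_map]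
    have : ((fun p : Bool × Bool => p.1 && p.2) ∘ fun e =>
        ((if (pvOrEmpty exclude_tags).any (fun t => (pvGetTags e).contains t) then false else true),
         (if il.any (fun t => (pvGetTags e).contains t) then true else false)))
        = fun e => (if (pvOrEmpty exclude_tags).any (fun t => (pvGetTags e).contains t) then false else true)
            && (if il.any (fun t => (pvGetTags e).contains t) then true else false) := rfl
    rw [this, pv_zip_filter]
    apply List.filter_congr
    intro e _
    simp only [pv_if_not, pv_if_id]

-- A's loop shape without an include test: skip-or-append
theorem pv_loop_noinc {α : Type} (skip : α → Bool) :
    ∀ (l : List α) (acc : List α),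
      l.foldl (fun r e => if skip e then r else r ++ [e]) acc
        = acc ++ l.filter (fun e => !skip e) := by
  intro l
  induction l with
  | nil => simp
  | cons x xs ih =>
    intro acc
    by_cases h : skip x = true <;> simp [h, ih]

-- A's loop shape with an include test: skip, then keep-or-drop
theorem pv_loop_inc {α : Type} (skip keep : α → Bool) :
    ∀ (l : List α) (acc : List α),
      l.foldl (fun r e => if skip e then r else if keep e then r ++ [e] else r) acc
        = acc ++ l.filter (fun e => !skip e && keep e) := by
  intro l
  induction l with
  | nil => simp
  | cons x xs ih =>
    intro acc
    by_cases h : skip x = true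
    · simp [h, ih]
    · by_cases h2 : keep x = true <;> simp [h, h2, ih]

theorem pv_any_swap (xs ys : List String) :
    (xs.any fun t => decide (t ∈ ys)) = (ys.any fun t => decide (t ∈ xs)) := by
  rw [Bool.eq_iff_iff]
  simp only [List.any_eq_true, decide_eq_true_eq]
  tauto

theorem pv_trunc (ex tags : List String) :
    (ex.isEmpty || !(tags.any fun t => decide (t ∈ ex))) = !(ex.any fun t => decide (t ∈ tags)) := by
  cases ex with
  | nil => simp
  | cons a l => simp only [List.isEmpty_cons, Bool.false_or, pv_any_swap tags (a :: l)]

-- ===== VERDICT (by name: the statement is the Claim_ definition above) =====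
theorem filter_entries_by_tags_spec : Claim_equal_filter_entries_by_tags := by
  intro entries include_tags exclude_tags _
  unfold Spec_filter_entries_by_tags
  by_cases he : entries.isEmpty
  · simp [filter_entries_by_tags, filter_entries_by_tags_alt, he]
  · rw [pv_alt_eq_filter entries include_tags exclude_tags (by simp_all)]
    unfold filter_entries_by_tags
    simp only [he, Bool.false_eq_true, if_false]
    cases exclude_tags with
    | none =>
      cases include_tags with
      | none =>
        rw [pv_loop_noinc (fun _ => false) entries []]
        simp [pvOrEmpty]
      | some il =>
        rw [pv_loop_inc (fun _ => false)
          (fun e => (pvGetTags e).any (fun tag => il.contains tag)) entries []]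
        simp only [List.nil_append]
        apply List.filter_congr
        intro e _
        simp [pvOrEmpty]
        rw [pv_any_swap]
    | some ex =>
      cases include_tags with
      | none =>
        rw [pv_loop_noinc (fun e : List (String × List String) =>
          !ex.isEmpty && (pvGetTags e).any (fun tag => ex.contains tag)) entries []]
        simp only [List.nil_append]
        apply List.filter_congr
        intro e _
        simp [pvOrEmpty]
        rw [pv_trunc]
      | some il =>
        rw [pv_loop_inc (fun e : List (String × List String) =>
            !ex.isEmpty && (pvGetTags e).any (fun tag => ex.contains tag))
          (fun e => (pvGetTags e).any (fun tag => il.contains tag)) entries []]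
        simp only [List.nil_append]
        apply List.filter_congr
        intro e _
        simp [pvOrEmpty]
        rw [pv_trunc, pv_any_swap (pvGetTags e) il]
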